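-- pv_equiv track=rewrite | github.com/alexiskuypersai-art/AI-Data-Intelligence-Projects | mutate_strings.py | mutate_my_strings
-- ===== SOURCE A (Python) =====
-- def mutate_my_strings(s1, s2):
--     res = [s1]
--     current = list(s1)
--
--     for i in range(len(s1)):
--         if s1[i] != s2[i]:
--             current[i] = s2[i]
--             res.append("".join(current))
--
--     return "\n".join(res)
-- ===== SOURCE B (Python) =====
-- def mutate_my_strings(s1, s2):
--     res = [s1] + [s2[:i + 1] + s1[i + 1:]
--                   for i in range(len(s1)) if s1[i] != s2[i]]
--     return "\n".join(res)
-- ===== Notes on version B (the rewrite author's own statement) =====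
-- stated objective: simpler
-- what changed: B drops the mutable character buffer and its join-per-step accumulator: each intermediate line is built directly from the two originals as s2[:i+1]+s1[i+1:] in a single comprehension.
import Mathlib
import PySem

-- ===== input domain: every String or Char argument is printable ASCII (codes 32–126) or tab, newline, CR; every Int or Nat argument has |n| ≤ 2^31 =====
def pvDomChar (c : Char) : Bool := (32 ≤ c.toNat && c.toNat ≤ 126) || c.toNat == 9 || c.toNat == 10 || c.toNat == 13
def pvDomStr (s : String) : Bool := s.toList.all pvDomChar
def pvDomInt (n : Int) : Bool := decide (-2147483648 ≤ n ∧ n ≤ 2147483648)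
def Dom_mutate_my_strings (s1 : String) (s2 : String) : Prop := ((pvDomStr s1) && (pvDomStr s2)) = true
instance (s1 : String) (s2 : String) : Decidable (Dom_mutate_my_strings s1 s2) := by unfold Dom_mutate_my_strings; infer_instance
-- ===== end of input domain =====

-- B replaces A's mutable character buffer (mutated and re-joined each step) by building every
-- line directly from the two originals via slices s2[:i+1]+s1[i+1:] in one comprehension (simpler).

-- ===== PORT A =====
-- one loop step of A: compare s1[i] with s2[i]; on mismatch overwrite current[i] and append the join
def mutStepA (l1 l2 : List Char) (st : List Char × List String) (i : Nat) : List Char × List String :=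
  if l1.getD i ' ' ≠ l2.getD i ' ' then
    let cur := st.1.set i (l2.getD i ' ')
    (cur, st.2 ++ [String.mk cur])
  else st

-- indexing via getD is exact under Pre_ (every index used is in range of both strings)
def mutate_my_strings (s1 : String) (s2 : String) : String :=
  let l1 := s1.toList
  let l2 := s2.toList
  let st := (List.range l1.length).foldl (mutStepA l1 l2) (l1, [s1])
  String.intercalate "\n" st.2

-- ===== PORT B =====
-- s2[:i+1] + s1[i+1:]  (nonnegative slice bounds, so take/drop is exact)
def lineB (l1 l2 : List Char) (i : Nat) : String := String.mk (l2.take (i + 1) ++ l1.drop (i + 1))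

def mutate_my_strings_alt (s1 : String) (s2 : String) : String :=
  let l1 := s1.toList
  let l2 := s2.toList
  String.intercalate "\n"
    (s1 :: ((List.range l1.length).filter
        (fun i => l1.getD i ' ' ≠ l2.getD i ' ')).map (lineB l1 l2))

-- ===== PRECONDITION & SPEC =====
-- Pre_ excludes exactly the inputs where A raises IndexError (s2 shorter than s1); B raises there too.
def Pre_mutate_my_strings (s1 : String) (s2 : String) : Prop :=
  s1.toList.length ≤ s2.toList.length
instance (s1 : String) (s2 : String) : Decidable (Pre_mutate_my_strings s1 s2) := by
  unfold Pre_mutate_my_strings; infer_instance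

def pvWitness_mutate_my_strings : String × String := ("cat", "car")

def Spec_mutate_my_strings (s1 : String) (s2 : String) (out : String) : Prop := out = mutate_my_strings_alt s1 s2
instance (s1 : String) (s2 : String) (out : String) : Decidable (Spec_mutate_my_strings s1 s2 out) := by unfold Spec_mutate_my_strings; infer_instance

-- ===== CLAIM (what is proved, stated in full; the proofs are below) =====
def Claim_equal_mutate_my_strings : Prop := ∀ (s1 : String) (s2 : String), Dom_mutate_my_strings s1 s2 → Pre_mutate_my_strings s1 s2 → Spec_mutate_my_strings s1 s2 (mutate_my_strings s1 s2)

-- ===== LEMMAS AND PROOFS =====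

-- A's buffer after the first n loop iterations is exactly s2[:n] ++ s1[n:], and its result list
-- is s1 followed by B's lines for the mismatching indices below n.
lemma mutLoop (l1 l2 : List Char) (h : l1.length ≤ l2.length) (s1 : String) :
    ∀ n, n ≤ l1.length →
      (List.range n).foldl (mutStepA l1 l2) (l1, [s1]) =
        (l2.take n ++ l1.drop n,
         s1 :: ((List.range n).filter
            (fun i => l1.getD i ' ' ≠ l2.getD i ' ')).map (lineB l1 l2)) := by
  intro n
  induction n with
  | zero => simp
  | succ n ih =>
    intro hn
    have hn' : n ≤ l1.length := Nat.le_of_succ_le hn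
    have h1 : n < l1.length := hn
    have h2 : n < l2.length := Nat.lt_of_lt_of_le h1 h
    have hd1 : l1.getD n ' ' = l1[n] := List.getD_eq_getElem l1 ' ' h1
    have hd2 : l2.getD n ' ' = l2[n] := List.getD_eq_getElem l2 ' ' h2
    have hdrop : l1.drop n = l1[n] :: l1.drop (n + 1) :=
      (List.getElem_cons_drop h1).symm
    have htake : l2.take (n + 1) = l2.take n ++ [l2[n]] :=
      List.take_succ_eq_append_getElem h2
    have hlen : (l2.take n).length = n := by simp [Nat.le_of_lt h2]
    rw [List.range_succ, List.foldl_append, ih hn', List.foldl_cons, List.foldl_nil]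
    by_cases hne : l1.getD n ' ' ≠ l2.getD n ' '
    · have hset : (l2.take n ++ l1.drop n).set n (l2.getD n ' ')
          = l2.take (n + 1) ++ l1.drop (n + 1) := by
        rw [hdrop, htake, hd2]
        rw [show (l2.take n ++ l1[n] :: l1.drop (n + 1)).set n l2[n]
              = l2.take n ++ (l1[n] :: l1.drop (n + 1)).set (n - (l2.take n).length) l2[n] by
            rw [List.set_append]; simp [hlen]]
        rw [hlen, Nat.sub_self, List.append_assoc]
        rfl
      have hline : lineB l1 l2 n = String.mk (l2.take (n + 1) ++ l1.drop (n + 1)) := rfl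
      have hne' : ¬ (l1[n]?.getD ' ' = l2[n]?.getD ' ') := by
        simpa [List.getD] using hne
      simp only [mutStepA, if_pos hne, hset]
      rw [List.filter_append, List.map_append]
      simp [hne', hline]
    · have heq : l1[n] = l2[n] := by
        have := not_not.mp hne; rw [hd1, hd2] at this; exact this
      have hst : l2.take n ++ l1.drop n = l2.take (n + 1) ++ l1.drop (n + 1) := by
        rw [hdrop, htake, heq, List.append_assoc]; rfl
      have heq' : l1[n]?.getD ' ' = l2[n]?.getD ' ' := by
        simpa [List.getD] using not_not.mp hne
      simp only [mutStepA, if_neg hne]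
      rw [List.filter_append, List.map_append, hst]
      simp [heq']

-- ===== VERDICT (by name: the statement is the Claim_ definition above) =====
theorem mutate_my_strings_spec : Claim_equal_mutate_my_strings := by
  intro s1 s2 _ hpre
  unfold Spec_mutate_my_strings mutate_my_strings mutate_my_strings_alt
  dsimp only
  rw [mutLoop s1.toList s2.toList hpre s1 s1.toList.length (Nat.le_refl _)]
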